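-- pv_equiv track=rewrite | github.com/mrigakshichib/gfgpractice | Medium/Construct list using given q XOR queries/construct-list-using-given-q-xor-queries.py | constructList
-- ===== SOURCE A (Python) =====
-- from typing import List
--
-- def constructList(q : int, queries : List[List[int]]) -> List[int]:
--     # code here
--     s = [0]
--     current_xor = 0
--
--     for query in queries:
--         if query[0] == 0:
--             x = query[1]
--             s.append(x ^ current_xor)
--         elif query[0] == 1:
--             x = query[1]
--             current_xor ^= x
--
--
--     s = [x ^ current_xor for x in s]
--
--
--     s.sort()
--     return s
-- ===== SOURCE B (Python) =====
-- from typing import List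
--
-- def constructList(q : int, queries : List[List[int]]) -> List[int]:
--     # Process queries right-to-left: acc is the XOR of the type-1 values that come
--     # AFTER the current query, so each type-0 value is final immediately and the
--     # lazy current_xor accumulator and the final correction pass disappear.
--     acc = 0
--     res = []
--     for query in reversed(queries):
--         if query[0] == 1:
--             acc ^= query[1]
--         elif query[0] == 0:
--             res.append(query[1] ^ acc)
--     return sorted([acc] + res)
-- ===== Notes on version B (the rewrite author's own statement) =====
-- stated objective: simpler
-- what changed: B makes a single right-to-left pass with a suffix-XOR accumulator so every type-0 value is final when appended, eliminating A's lazy current_xor accumulator and its final correction comprehension.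
import Mathlib
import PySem

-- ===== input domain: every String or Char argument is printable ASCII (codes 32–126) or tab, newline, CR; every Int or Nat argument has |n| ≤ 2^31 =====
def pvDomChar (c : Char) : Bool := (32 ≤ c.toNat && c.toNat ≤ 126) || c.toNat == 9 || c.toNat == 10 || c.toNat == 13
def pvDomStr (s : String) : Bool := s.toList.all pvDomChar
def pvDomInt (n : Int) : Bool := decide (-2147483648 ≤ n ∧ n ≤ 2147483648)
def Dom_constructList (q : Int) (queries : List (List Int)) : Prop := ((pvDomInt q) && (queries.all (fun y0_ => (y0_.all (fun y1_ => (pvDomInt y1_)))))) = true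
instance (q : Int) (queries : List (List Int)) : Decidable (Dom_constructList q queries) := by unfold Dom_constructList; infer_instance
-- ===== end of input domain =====

-- B replaces A's lazy left-to-right accumulator + final correction pass by one right-to-left
-- pass with a suffix-XOR accumulator; objective: simpler.

-- ===== PORT A =====
-- lazy: state is (s, current_xor); type-0 appends x ^ current_xor, type-1 folds x into
-- current_xor; afterwards every element is corrected by current_xor, then sorted.
def constructListStepA (st : List Int × Int) (query : List Int) : List Int × Int :=
  match PySem.List.pyGet? query 0 with
  | none => st  -- Python raises here (excluded by Pre_)
  | some h =>
    if h == 0 then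
      match PySem.List.pyGet? query 1 with
      | none => st  -- Python raises here (excluded by Pre_)
      | some x => (st.1 ++ [PySem.Int.bxor x st.2], st.2)
    else if h == 1 then
      match PySem.List.pyGet? query 1 with
      | none => st  -- Python raises here (excluded by Pre_)
      | some x => (st.1, PySem.Int.bxor st.2 x)
    else st

def constructList (q : Int) (queries : List (List Int)) : List Int :=
  let st := queries.foldl constructListStepA ([0], 0)
  PySem.List.sorted (st.1.map (fun x => PySem.Int.bxor x st.2)) (fun x => x)

-- ===== PORT B =====
-- one reversed pass: acc is the XOR of the type-1 values already seen (those AFTER the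
-- current query), so a type-0 value is appended in final form; acc itself ends up as the
-- final value of the initial 0 element.
def constructListStepB (st : Int × List Int) (query : List Int) : Int × List Int :=
  match PySem.List.pyGet? query 0 with
  | none => st  -- Python raises here (excluded by Pre_)
  | some h =>
    if h == 1 then
      match PySem.List.pyGet? query 1 with
      | none => st  -- Python raises here (excluded by Pre_)
      | some x => (PySem.Int.bxor st.1 x, st.2)
    else if h == 0 then
      match PySem.List.pyGet? query 1 with
      | none => st  -- Python raises here (excluded by Pre_)
      | some x => (st.1, st.2 ++ [PySem.Int.bxor x st.1])
    else st

def constructList_alt (q : Int) (queries : List (List Int)) : List Int :=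
  let st := queries.reverse.foldl constructListStepB (0, [])
  PySem.List.sorted ([st.1] ++ st.2) (fun x => x)

-- ===== PRECONDITION & SPEC =====
-- Pre_ excludes exactly the inputs on which Python A raises IndexError: a query that is
-- the empty list (query[0] fails), or a query headed 0 or 1 with no second entry.
def Pre_constructList (q : Int) (queries : List (List Int)) : Prop :=
  ∀ qu ∈ queries, 1 ≤ qu.length ∧ ((qu.headI = 0 ∨ qu.headI = 1) → 2 ≤ qu.length)
instance (q : Int) (queries : List (List Int)) : Decidable (Pre_constructList q queries) := by
  unfold Pre_constructList; infer_instance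
def pvWitness_constructList : Int × List (List Int) := (3, [[0, 5], [1, 3], [0, 4]])

def Spec_constructList (q : Int) (queries : List (List Int)) (out : List Int) : Prop := out = constructList_alt q queries
instance (q : Int) (queries : List (List Int)) (out : List Int) : Decidable (Spec_constructList q queries out) := by unfold Spec_constructList; infer_instance

-- ===== CLAIM (what is proved, stated in full; the proofs are below) =====
def Claim_equal_constructList : Prop := ∀ (q : Int) (queries : List (List Int)), Dom_constructList q queries → Pre_constructList q queries → Spec_constructList q queries (constructList q queries)

-- ===== LEMMAS AND PROOFS =====

-- xor algebra for PySem.Int.bxor via the (magnitude, sign) encoding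
def pvEnc (a : Int) : Nat := if 0 ≤ a then a.toNat else (-a - 1).toNat
def pvNeg (a : Int) : Bool := decide (a < 0)
def pvDec (n : Nat) (b : Bool) : Int := if b then -(n : Int) - 1 else (n : Int)

theorem pvEnc_dec (n : Nat) (b : Bool) : pvEnc (pvDec n b) = n := by
  unfold pvDec pvEnc; cases b <;> simp <;> omega

theorem pvNeg_dec (n : Nat) (b : Bool) : pvNeg (pvDec n b) = b := by
  unfold pvDec pvNeg; cases b <;> simp <;> omega

theorem bxor_enc (a b : Int) :
    PySem.Int.bxor a b = pvDec (pvEnc a ^^^ pvEnc b) (pvNeg a != pvNeg b) := by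
  unfold pvDec pvEnc pvNeg PySem.Int.bxor
  split_ifs with h1 h2 h3 <;> simp_all <;> omega

theorem bxor_assoc (a b c : Int) :
    PySem.Int.bxor (PySem.Int.bxor a b) c = PySem.Int.bxor a (PySem.Int.bxor b c) := by
  rw [bxor_enc a b, bxor_enc b c, bxor_enc _ c, bxor_enc a,
      pvEnc_dec, pvNeg_dec, pvEnc_dec, pvNeg_dec, Nat.xor_assoc]
  have hb : ((pvNeg a != pvNeg b) != pvNeg c) = (pvNeg a != (pvNeg b != pvNeg c)) := by
    cases pvNeg a <;> cases pvNeg b <;> cases pvNeg c <;> rfl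
  rw [hb]

theorem bxor_zero_left (a : Int) : PySem.Int.bxor 0 a = a := by
  rw [PySem.Int.bxor_comm]; exact PySem.Int.bxor_zero a

theorem bxor_cancel_mid (x c t : Int) :
    PySem.Int.bxor (PySem.Int.bxor x c) (PySem.Int.bxor c t) = PySem.Int.bxor x t := by
  rw [bxor_assoc, ← bxor_assoc c c t, PySem.Int.bxor_self, bxor_zero_left]

-- pvG queries = (final values of the type-0 queries in order, XOR of the type-1 values):
-- the common mathematical description both loops compute.
def pvG : List (List Int) → List Int × Int
  | [] => ([], 0)
  | qu :: rest =>
    let p := pvG rest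
    match PySem.List.pyGet? qu 0 with
    | none => p
    | some h =>
      if h == 0 then
        match PySem.List.pyGet? qu 1 with
        | none => p
        | some x => (PySem.Int.bxor x p.2 :: p.1, p.2)
      else if h == 1 then
        match PySem.List.pyGet? qu 1 with
        | none => p
        | some x => (p.1, PySem.Int.bxor x p.2)
      else p

-- A's loop, corrected by its final accumulator, yields the pvG values
theorem foldA_char (qs : List (List Int)) : ∀ (s0 : List Int) (c0 : Int),
    (qs.foldl constructListStepA (s0, c0)).1.map
        (fun x => PySem.Int.bxor x (qs.foldl constructListStepA (s0, c0)).2)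
      = s0.map (fun x => PySem.Int.bxor x (PySem.Int.bxor c0 (pvG qs).2)) ++ (pvG qs).1 := by
  induction qs with
  | nil => intro s0 c0; simp [pvG, PySem.Int.bxor_zero]
  | cons qu rest ih =>
    intro s0 c0
    simp only [List.foldl_cons, pvG, constructListStepA]
    cases hg : PySem.List.pyGet? qu 0 with
    | none => exact ih s0 c0
    | some h =>
      dsimp only
      cases h0 : (h == 0) with
      | true =>
        simp only [if_pos rfl, if_true]
        cases hx : PySem.List.pyGet? qu 1 with
        | none => exact ih s0 c0
        | some x =>
          dsimp only
          rw [ih (s0 ++ [PySem.Int.bxor x c0]) c0]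
          simp [bxor_cancel_mid]
      | false =>
        simp only [Bool.false_eq_true, if_false]
        cases h1 : (h == 1) with
        | true =>
          simp only [if_pos rfl, if_true]
          cases hx : PySem.List.pyGet? qu 1 with
          | none => exact ih s0 c0
          | some x =>
            dsimp only
            rw [ih s0 (PySem.Int.bxor c0 x), bxor_assoc]
        | false =>
          simp only [Bool.false_eq_true, if_false]
          exact ih s0 c0

-- B's reversed loop collects the pvG values (in reverse order) and the pvG accumulator
theorem foldB_char (qs : List (List Int)) : ∀ (a0 : Int) (r0 : List Int),
    qs.reverse.foldl constructListStepB (a0, r0)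
      = (PySem.Int.bxor a0 (pvG qs).2,
         r0 ++ ((pvG qs).1.map (fun v => PySem.Int.bxor v a0)).reverse) := by
  induction qs with
  | nil => intro a0 r0; simp [pvG, PySem.Int.bxor_zero]
  | cons qu rest ih =>
    intro a0 r0
    rw [List.reverse_cons, List.foldl_append, ih a0 r0]
    simp only [List.foldl_cons, List.foldl_nil, pvG, constructListStepB]
    cases hg : PySem.List.pyGet? qu 0 with
    | none => rfl
    | some h =>
      dsimp only
      cases h1 : (h == 1) with
      | true =>
        have h0 : (h == 0) = false := by
          cases hh : (h == 0) <;> simp_all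
        simp only [if_pos rfl, if_true, h0, Bool.false_eq_true, if_false]
        cases hx : PySem.List.pyGet? qu 1 with
        | none => rfl
        | some x =>
          dsimp only
          rw [bxor_assoc, PySem.Int.bxor_comm (pvG rest).2 x]
      | false =>
        simp only [h1, Bool.false_eq_true, if_false]
        cases h0 : (h == 0) with
        | true =>
          simp only [if_pos rfl, if_true]
          cases hx : PySem.List.pyGet? qu 1 with
          | none => rfl
          | some x =>
            dsimp only
            rw [List.map_cons, List.reverse_cons, ← List.append_assoc,
                PySem.Int.bxor_comm a0 (pvG rest).2, ← bxor_assoc]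
        | false =>
          simp only [Bool.false_eq_true, if_false]

theorem perm_pre_sort (t : Int) (l : List Int) : (t :: l).Perm ([t] ++ l.reverse) :=
  (l.reverse_perm.symm).cons t

-- ===== VERDICT (by name: the statement is the Claim_ definition above) =====
theorem constructList_spec : Claim_equal_constructList := by
  intro q queries _ _
  unfold Spec_constructList constructList constructList_alt
  show PySem.List.sorted
      ((queries.foldl constructListStepA ([0], 0)).1.map
        (fun x => PySem.Int.bxor x (queries.foldl constructListStepA ([0], 0)).2)) (fun x => x)
    = PySem.List.sorted
      ([(queries.reverse.foldl constructListStepB (0, [])).1]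
        ++ (queries.reverse.foldl constructListStepB (0, [])).2) (fun x => x)
  rw [foldA_char queries [0] 0, foldB_char queries 0]
  simp only [List.map_cons, List.map_nil, bxor_zero_left, PySem.Int.bxor_zero, List.map_id',
    List.nil_append, List.singleton_append]
  exact (PySem.List.sorted_id_eq_sorted_id_iff_perm _ _).mpr
    (perm_pre_sort (pvG queries).2 (pvG queries).1)
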